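-- pv_equiv track=rewrite | github.com/JH-TT/Coding_Practice | Programmers/Implementation_P/42840.py | solution
-- ===== SOURCE A (Python) =====
-- def solution(answers):
--     first = [1, 2, 3, 4, 5]
--     second = [2, 1, 2, 3, 2, 4, 2, 5]
--     third = [3, 3, 1, 1, 2, 2, 4, 4, 5, 5]
--     score = [0, 0, 0]
--
--     for i, cor in enumerate(answers):
--         # 각 리스트를 순환하도록 % 기호를 이용한다.
--         if cor == first[i%len(first)]:
--             score[0] += 1
--         if cor == second[i%len(second)]:
--             score[1] += 1
--         if cor == third[i%len(third)]:
--             score[2] += 1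
--
--     answer = []
--     high = max(score)
--
--     for i, s in enumerate(score):
--         if s == high:
--             answer.append(i+1)
--
--     return answer
-- ===== SOURCE B (Python) =====
-- def solution(answers):
--     # Histogram approach: one counting pass over the answers that never looks at
--     # the guess patterns (a 40x6 table cnt[r][v] = how many answers equal v at
--     # positions congruent to r mod 40, 40 = lcm of the pattern periods), then
--     # each pattern's score is read off with 40 constant table lookups.
--     cnt = [[0] * 6 for _ in range(40)]
--     for i, a in enumerate(answers):
--         if 1 <= a <= 5:
--             cnt[i % 40][a] += 1
--     patterns = [[1, 2, 3, 4, 5],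
--                 [2, 1, 2, 3, 2, 4, 2, 5],
--                 [3, 3, 1, 1, 2, 2, 4, 4, 5, 5]]
--     scores = [sum(cnt[r][p[r % len(p)]] for r in range(40)) for p in patterns]
--     high = max(scores)
--     return [k + 1 for k, s in enumerate(scores) if s == high]
-- ===== Notes on version B (the rewrite author's own statement) =====
-- stated objective: faster
-- what changed: B never compares answers against the patterns elementwise: it builds a 40x6 position-residue/value histogram of the answers in one pattern-blind pass (40 = lcm of the three pattern periods) and then reads each pattern's score off as 40 constant table lookups, whereas A walks the answers testing each element against all three cyclic patterns.
import Mathlib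
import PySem

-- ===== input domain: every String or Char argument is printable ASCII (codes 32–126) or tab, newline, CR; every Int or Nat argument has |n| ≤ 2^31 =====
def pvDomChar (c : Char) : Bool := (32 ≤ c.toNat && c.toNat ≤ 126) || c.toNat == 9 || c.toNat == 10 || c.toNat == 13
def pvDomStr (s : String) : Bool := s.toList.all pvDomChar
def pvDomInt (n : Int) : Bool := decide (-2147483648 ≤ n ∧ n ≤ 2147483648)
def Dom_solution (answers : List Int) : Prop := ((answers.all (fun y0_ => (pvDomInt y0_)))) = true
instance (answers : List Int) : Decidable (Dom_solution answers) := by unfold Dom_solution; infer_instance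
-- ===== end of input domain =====

-- B replaces A's elementwise pattern comparison by a pattern-blind 40x6
-- position-residue/value histogram of the answers (40 = lcm of the pattern
-- periods), from which each pattern's score is read off with 40 table lookups;
-- one range check per element replaces three pattern lookups+comparisons
-- (objective: faster, constant factor, measured; same behaviour incl. [] ↦ [1,2,3]).

-- ===== PORT A =====
-- step of A's scoring loop: three independent `if`s bump the three counters
def pvStepA (sc : Int × Int × Int) (p : Int × Int) : Int × Int × Int :=
  let first : List Int := [1, 2, 3, 4, 5]
  let second : List Int := [2, 1, 2, 3, 2, 4, 2, 5]
  let third : List Int := [3, 3, 1, 1, 2, 2, 4, 4, 5, 5]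
  let sc := if p.2 = PySem.List.pyGetD first (PySem.Int.mod p.1 (first.length : Int)) 0
            then (sc.1 + 1, sc.2.1, sc.2.2) else sc
  let sc := if p.2 = PySem.List.pyGetD second (PySem.Int.mod p.1 (second.length : Int)) 0
            then (sc.1, sc.2.1 + 1, sc.2.2) else sc
  let sc := if p.2 = PySem.List.pyGetD third (PySem.Int.mod p.1 (third.length : Int)) 0
            then (sc.1, sc.2.1, sc.2.2 + 1) else sc
  sc

def solution (answers : List Int) : List Int :=
  let score := (PySem.List.enumerate answers 0).foldl pvStepA (0, 0, 0)
  let scoreList : List Int := [score.1, score.2.1, score.2.2]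
  let high := (PySem.List.max? scoreList (fun y => y)).getD 0
  (PySem.List.enumerate scoreList 0).foldl
    (fun ans p => if p.2 = high then ans ++ [p.1 + 1] else ans) []

-- ===== PORT B =====
-- the counting table is ported as a function Int → Int → Int updated pointwise
-- (exact for Python's `cnt[i % 40][a] += 1` under the guard 1 ≤ a ≤ 5)
def pvBump (c : Int → Int → Int) (q : Int × Int) : Int → Int → Int :=
  if 1 ≤ q.2 ∧ q.2 ≤ 5 then
    fun r v => if r = PySem.Int.mod q.1 40 ∧ v = q.2 then c r v + 1 else c r v
  else c

def solution_alt (answers : List Int) : List Int :=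
  let cnt := (PySem.List.enumerate answers 0).foldl pvBump (fun _ _ => 0)
  let patterns : List (List Int) :=
    [[1, 2, 3, 4, 5], [2, 1, 2, 3, 2, 4, 2, 5], [3, 3, 1, 1, 2, 2, 4, 4, 5, 5]]
  let scores := patterns.map (fun p =>
    ((PySem.List.pyRange 0 40 1).map
      (fun r => cnt r (PySem.List.pyGetD p (PySem.Int.mod r (p.length : Int)) 0))).sum)
  let high := (PySem.List.max? scores (fun y => y)).getD 0
  (PySem.List.enumerate scores 0).filterMap
    (fun q => if q.2 = high then some (q.1 + 1) else none)

-- ===== PRECONDITION & SPEC =====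
def Spec_solution (answers : List Int) (out : List Int) : Prop := out = solution_alt answers
instance (answers : List Int) (out : List Int) : Decidable (Spec_solution answers out) := by unfold Spec_solution; infer_instance

-- ===== CLAIM =====
def Claim_equal_solution : Prop := ∀ (answers : List Int), Dom_solution answers → Spec_solution answers (solution answers)

-- ===== LEMMAS AND PROOFS =====

-- the cyclic pattern value at (any) position r
def pvVal (p : List Int) (r : Int) : Int :=
  PySem.List.pyGetD p (PySem.Int.mod r (p.length : Int)) 0

-- A's per-pattern match count over `enumerate xs s`
def pvCnt (p : List Int) (xs : List Int) (s : Int) : Int :=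
  ((PySem.List.enumerate xs s).map
    (fun q => if q.2 = pvVal p q.1 then (1 : Int) else 0)).sum

lemma pvVal_mem (p : List Int) (hne : p ≠ []) (r : Int) : pvVal p r ∈ p := by
  have hL : (0 : Int) < (p.length : Int) := by
    have := List.length_pos_iff.mpr hne
    exact_mod_cast this
  unfold pvVal
  rw [PySem.List.pyGetD_eq_getElem p 0 (PySem.Int.mod_nonneg r hL)
      (by simpa using PySem.Int.mod_lt r hL)]
  exact List.getElem_mem _

lemma pvVal_mod40 (p : List Int) (hne : p ≠ []) (hd : (p.length : Int) ∣ 40) (s : Int) :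
    pvVal p (PySem.Int.mod s 40) = pvVal p s := by
  have hL : (0 : Int) < (p.length : Int) := by
    have := List.length_pos_iff.mpr hne
    exact_mod_cast this
  unfold pvVal
  rw [PySem.Int.mod_eq_emod_of_pos (by norm_num : (0:Int) < 40),
      PySem.Int.mod_eq_emod_of_pos hL, PySem.Int.mod_eq_emod_of_pos hL,
      Int.emod_emod_of_dvd _ hd]

-- a sum over a nodup list that picks out one element
lemma sum_ite_single (l : List Int) (hnd : l.Nodup) (j : Int) (hj : j ∈ l) (f : Int → Int) :
    (l.map (fun r => if r = j then f r else 0)).sum = f j := by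
  induction l with
  | nil => cases hj
  | cons x t ih =>
    rcases List.nodup_cons.mp hnd with ⟨hx, hnt⟩
    rcases List.mem_cons.mp hj with h | h
    · subst h
      simp only [List.map_cons, List.sum_cons]
      have hz : (t.map (fun r => if r = j then f r else 0)).sum = 0 := by
        apply List.sum_eq_zero
        intro y hy
        rcases List.mem_map.mp hy with ⟨r, hr, hry⟩
        have hrx : r ≠ j := fun hh => hx (hh ▸ hr)
        simpa [hrx] using hry.symm
      simp [hz]
    · have hxj : x ≠ j := fun hh => hx (hh ▸ h)
      simp only [List.map_cons, List.sum_cons, if_neg hxj, ih hnt h]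
      omega

-- one pvBump step, summed over the 40 residues
lemma bump_step (p : List Int) (hne : p ≠ []) (hd : (p.length : Int) ∣ 40)
    (hv : ∀ x ∈ p, 1 ≤ x ∧ x ≤ 5) (c : Int → Int → Int) (s a : Int) :
    ((PySem.List.pyRange 0 40 1).map (fun r => pvBump c (s, a) r (pvVal p r))).sum
      = ((PySem.List.pyRange 0 40 1).map (fun r => c r (pvVal p r))).sum
        + (if a = pvVal p s then 1 else 0) := by
  by_cases hg : 1 ≤ a ∧ a ≤ 5
  · simp only [pvBump, if_pos hg]
    have hsplit : (fun r => if r = PySem.Int.mod s 40 ∧ pvVal p r = a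
          then c r (pvVal p r) + 1 else c r (pvVal p r))
        = fun r => c r (pvVal p r) +
            (if r = PySem.Int.mod s 40 then (if pvVal p r = a then 1 else 0) else 0) := by
      funext r
      by_cases h1 : r = PySem.Int.mod s 40
      · by_cases h2 : pvVal p r = a
        · rw [if_pos ⟨h1, h2⟩, if_pos h1, if_pos h2]
        · rw [if_neg (fun hc => h2 hc.2), if_pos h1, if_neg h2, add_zero]
      · rw [if_neg (fun hc => h1 hc.1), if_neg h1, add_zero]
    rw [hsplit, PySem.List.sum_map_add_int]
    have hmem : PySem.Int.mod s 40 ∈ PySem.List.pyRange 0 40 1 := by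
      rw [PySem.List.mem_pyRange_one]
      exact ⟨PySem.Int.mod_nonneg s (by norm_num), PySem.Int.mod_lt s (by norm_num)⟩
    rw [sum_ite_single _ (PySem.List.nodup_pyRange_one 0 40) _ hmem
        (fun r => if pvVal p r = a then 1 else 0)]
    rw [pvVal_mod40 p hne hd s]
    by_cases h : pvVal p s = a
    · simp [h]
    · have h' : ¬ a = pvVal p s := fun hh => h hh.symm
      simp [h, h']
  · simp only [pvBump, if_neg hg]
    have hz : (if a = pvVal p s then (1:Int) else 0) = 0 := by
      have := hv (pvVal p s) (pvVal_mem p hne s)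
      split_ifs with h
      · exact absurd (h ▸ this) (by omega)
      · rfl
    omega

-- the counting fold computes A's per-pattern count (for each of the patterns)
lemma bump_fold (p : List Int) (hne : p ≠ []) (hd : (p.length : Int) ∣ 40)
    (hv : ∀ x ∈ p, 1 ≤ x ∧ x ≤ 5) (xs : List Int) :
    ∀ (s : Int), 0 ≤ s → ∀ (c : Int → Int → Int),
    ((PySem.List.pyRange 0 40 1).map
       (fun r => ((PySem.List.enumerate xs s).foldl pvBump c) r (pvVal p r))).sum
      = ((PySem.List.pyRange 0 40 1).map (fun r => c r (pvVal p r))).sum + pvCnt p xs s := by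
  induction xs with
  | nil => intro s hs c; simp [PySem.List.enumerate_nil, pvCnt]
  | cons a t ih =>
    intro s hs c
    simp only [PySem.List.enumerate_cons, List.foldl_cons]
    rw [ih (s + 1) (by omega) (pvBump c (s, a)), bump_step p hne hd hv c s a]
    simp only [pvCnt, PySem.List.enumerate_cons, List.map_cons, List.sum_cons]
    ring

lemma bump_fold0 (p : List Int) (hne : p ≠ []) (hd : (p.length : Int) ∣ 40)
    (hv : ∀ x ∈ p, 1 ≤ x ∧ x ≤ 5) (answers : List Int) :
    ((PySem.List.pyRange 0 40 1).map
       (fun r => ((PySem.List.enumerate answers 0).foldl pvBump (fun _ _ => 0)) r (pvVal p r))).sum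
      = pvCnt p answers 0 := by
  rw [bump_fold p hne hd hv answers 0 le_rfl (fun _ _ => 0)]
  simp

-- pvStepA written as three independent 0/1 bumps
lemma pvStepA_eq (sc : Int × Int × Int) (p : Int × Int) :
    pvStepA sc p =
      (sc.1 + (if p.2 = pvVal [1, 2, 3, 4, 5] p.1 then 1 else 0),
       sc.2.1 + (if p.2 = pvVal [2, 1, 2, 3, 2, 4, 2, 5] p.1 then 1 else 0),
       sc.2.2 + (if p.2 = pvVal [3, 3, 1, 1, 2, 2, 4, 4, 5, 5] p.1 then 1 else 0)) := by
  simp only [pvStepA, pvVal]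
  split_ifs <;> simp

-- A's interleaved fold computes exactly the three independent counts
lemma foldl_stepA (xs : List Int) (s x y z : Int) :
    (PySem.List.enumerate xs s).foldl pvStepA (x, y, z) =
      (x + pvCnt [1, 2, 3, 4, 5] xs s,
       y + pvCnt [2, 1, 2, 3, 2, 4, 2, 5] xs s,
       z + pvCnt [3, 3, 1, 1, 2, 2, 4, 4, 5, 5] xs s) := by
  induction xs generalizing s x y z with
  | nil => simp [PySem.List.enumerate_nil, pvCnt]
  | cons a t ih =>
    simp only [PySem.List.enumerate_cons, List.foldl_cons, pvStepA_eq, ih, pvCnt,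
      List.map_cons, List.sum_cons, Prod.mk.injEq]
    refine ⟨by ring, by ring, by ring⟩

-- the two winner-collection styles agree on any three-element score list
lemma collect_eq (a b c h : Int) :
    (PySem.List.enumerate [a, b, c] 0).foldl
      (fun ans p => if p.2 = h then ans ++ [p.1 + 1] else ans) [] =
    (PySem.List.enumerate [a, b, c] 0).filterMap
      (fun q => if q.2 = h then some (q.1 + 1) else none) := by
  simp only [PySem.List.enumerate_cons, PySem.List.enumerate_nil, List.foldl_cons,
    List.foldl_nil, List.filterMap_cons, List.filterMap_nil]
  split_ifs <;> simp

-- ===== VERDICT =====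
theorem solution_spec : Claim_equal_solution := by
  intro answers _
  unfold Spec_solution solution solution_alt
  simp only [List.map_cons, List.map_nil]
  rw [foldl_stepA]
  have h1 := bump_fold0 [1, 2, 3, 4, 5] (by decide) (by decide) (by decide) answers
  have h2 := bump_fold0 [2, 1, 2, 3, 2, 4, 2, 5] (by decide) (by decide) (by decide) answers
  have h3 := bump_fold0 [3, 3, 1, 1, 2, 2, 4, 4, 5, 5] (by decide) (by decide) (by decide) answers
  simp only [pvVal] at h1 h2 h3
  simp only [h1, h2, h3]
  simp only [zero_add]
  exact collect_eq _ _ _ _
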